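-- pv_equiv track=rewrite | github.com/harryqingyuzhao/drugmap | compare.py | extract_number_unit
-- ===== SOURCE A (Python) =====
-- def extract_number_unit(strength_code_item) :
--     number = ''
--     unit = ''
--     item = strength_code_item.strip()
--     idx = 0
--     while idx < len(item) :
--         if item[idx] in ('0', '1', '2', '3', '4', '5', '6', '7', '8', '9', '.') :
--             number += item[idx]
--             idx += 1
--         else :
--             break
--     while idx < len(item) :
--         unit += item[idx]
--         idx += 1
--
--     return number, unit
-- ===== SOURCE B (Python) =====
-- def extract_number_unit(strength_code_item):
--     item = strength_code_item.strip()
--     rest = item.lstrip('0123456789.')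
--     n = len(item) - len(rest)
--     return item[:n], item[n:]
-- ===== Notes on version B (the rewrite author's own statement) =====
-- stated objective: faster
-- what changed: Replaces the two manual index/while scanning loops with character-by-character string concatenation by a single lstrip over the numeric characters to locate the prefix boundary, then two slices.
import Mathlib
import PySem

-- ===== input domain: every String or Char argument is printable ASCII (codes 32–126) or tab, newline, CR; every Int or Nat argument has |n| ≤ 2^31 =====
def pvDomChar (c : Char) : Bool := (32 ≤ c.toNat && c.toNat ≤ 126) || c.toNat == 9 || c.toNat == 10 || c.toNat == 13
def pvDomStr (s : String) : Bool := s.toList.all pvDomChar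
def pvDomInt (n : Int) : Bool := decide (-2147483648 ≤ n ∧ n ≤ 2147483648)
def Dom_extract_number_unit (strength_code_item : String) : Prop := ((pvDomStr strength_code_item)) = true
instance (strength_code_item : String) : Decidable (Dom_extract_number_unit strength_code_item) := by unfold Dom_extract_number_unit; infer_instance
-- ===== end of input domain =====

-- B replaces A's two index-driven while loops by an lstrip of the numeric characters plus two slices; objective: idiomatic.

-- ===== PORT A =====
-- the tuple ('0', …, '9', '.') of A's membership test
def pvNumChars : List Char := ['0', '1', '2', '3', '4', '5', '6', '7', '8', '9', '.']

-- first while loop: consume numeric-prefix chars into `number`, stop at the first other char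
def pvALoop1 : List Char → String → String × List Char
  | [], number => (number, [])
  | c :: rest, number =>
    if pvNumChars.contains c then pvALoop1 rest (number.push c) else (number, c :: rest)

-- second while loop: copy the remaining chars into `unit`
def pvALoop2 : List Char → String → String
  | [], unit => unit
  | c :: rest, unit => pvALoop2 rest (unit.push c)

def extract_number_unit (strength_code_item : String) : String × String :=
  let item := PySem.Str.strip strength_code_item
  let (number, rest) := pvALoop1 item.toList ""
  (number, pvALoop2 rest "")

-- ===== PORT B =====
def extract_number_unit_alt (strength_code_item : String) : String × String :=
  let item := PySem.Str.strip strength_code_item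
  -- item.lstrip('0123456789.') ported by hand as dropWhile of membership (exact for any string)
  let rest := item.toList.dropWhile (fun c => ("0123456789.".toList).contains c)
  let n : Int := PySem.Str.len item - (rest.length : Int)
  (PySem.Str.slice item none (some n), PySem.Str.slice item (some n) none)

-- ===== PRECONDITION & SPEC =====
def Spec_extract_number_unit (strength_code_item : String) (out : String × String) : Prop := out = extract_number_unit_alt strength_code_item
instance (strength_code_item : String) (out : String × String) : Decidable (Spec_extract_number_unit strength_code_item out) := by unfold Spec_extract_number_unit; infer_instance

-- ===== CLAIM (what is proved, stated in full; the proofs are below) =====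
def Claim_equal_extract_number_unit : Prop := ∀ (strength_code_item : String), Dom_extract_number_unit strength_code_item → Spec_extract_number_unit strength_code_item (extract_number_unit strength_code_item)

-- ===== LEMMAS AND PROOFS =====

lemma pvPush (acc : List Char) (c : Char) :
    (String.ofList acc).push c = String.ofList (acc ++ [c]) :=
  String.toList_inj.mp (by simp)

lemma pvALoop1_eq (cs : List Char) : ∀ acc : List Char,
    pvALoop1 cs (String.ofList acc) =
      (String.ofList (acc ++ cs.takeWhile (fun c => pvNumChars.contains c)),
       cs.dropWhile (fun c => pvNumChars.contains c)) := by
  induction cs with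
  | nil => intro acc; simp [pvALoop1]
  | cons c rest ih =>
    intro acc
    rw [pvALoop1, List.takeWhile_cons, List.dropWhile_cons]
    by_cases h : pvNumChars.contains c
    · rw [if_pos h, if_pos h, if_pos h, pvPush, ih (acc ++ [c])]
      simp
    · rw [if_neg h, if_neg h, if_neg h]; simp

lemma pvALoop2_eq (cs : List Char) : ∀ acc : List Char,
    pvALoop2 cs (String.ofList acc) = String.ofList (acc ++ cs) := by
  induction cs with
  | nil => intro acc; simp [pvALoop2]
  | cons c rest ih =>
    intro acc
    rw [pvALoop2, pvPush, ih (acc ++ [c])]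
    simp

lemma pvTake_len_takeWhile {α : Type} (p : α → Bool) (l : List α) :
    l.take (l.takeWhile p).length = l.takeWhile p := by
  induction l with
  | nil => simp
  | cons c t ih =>
    by_cases h : p c <;> simp [h, ih]

lemma pvDrop_len_takeWhile {α : Type} (p : α → Bool) (l : List α) :
    l.drop (l.takeWhile p).length = l.dropWhile p := by
  induction l with
  | nil => simp
  | cons c t ih =>
    by_cases h : p c <;> simp [h, ih]

-- ===== VERDICT (by name: the statement is the Claim_ definition above) =====
theorem extract_number_unit_spec : Claim_equal_extract_number_unit := by
  intro s _
  unfold Spec_extract_number_unit extract_number_unit extract_number_unit_alt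
  have hchars : ("0123456789.".toList) = pvNumChars := by decide
  dsimp only
  rw [hchars]
  have h0 : ("" : String) = String.ofList [] := rfl
  rw [h0, pvALoop1_eq _ [], pvALoop2_eq _ []]
  have hn : PySem.Str.len (PySem.Str.strip s)
        - (((PySem.Str.strip s).toList.dropWhile (fun c => pvNumChars.contains c)).length : Int)
      = (((PySem.Str.strip s).toList.takeWhile (fun c => pvNumChars.contains c)).length : Int) := by
    have h := congrArg List.length
      (List.takeWhile_append_dropWhile (p := fun c => pvNumChars.contains c)
        (l := (PySem.Str.strip s).toList))
    rw [List.length_append] at h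
    simp [PySem.Str.len] at h ⊢
    omega
  rw [hn]
  refine Prod.ext ?_ ?_
  · apply String.toList_inj.mp
    rw [PySem.Str.toList_slice, PySem.Chars.slice_eq_listSlice, PySem.List.slice_to_natCast,
      pvTake_len_takeWhile]
    simp
  · apply String.toList_inj.mp
    rw [PySem.Str.toList_slice, PySem.Chars.slice_eq_listSlice, PySem.List.slice_from_natCast,
      pvDrop_len_takeWhile]
    simp
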